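-- pv_equiv track=rewrite | github.com/amex-imd/CI-CD-studing | src/program.py | maxLenChainWithRandomDelete
-- ===== SOURCE A (Python) =====
-- from typing import List
--
-- def maxLenChainWithRandomDelete(lst: List[int]) -> int:
--     if not lst: return 0
--
--     prevChainLen: int = -1
--     currChainLen: int = 0
--
--     res: int = 0
--
--     for val in lst:
--         if val == 1:
--             currChainLen += 1
--         else:
--             res = max(res, prevChainLen + currChainLen)
--             prevChainLen = currChainLen
--             currChainLen = 0
--     res = max(res, prevChainLen + currChainLen)
--
--     return res
-- ===== SOURCE B (Python) =====
-- from typing import List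
--
-- def maxLenChainWithRandomDelete(lst: List[int]) -> int:
--     if not lst:
--         return 0
--     # DP arrays: left[i] = length of the run of 1s ending at i,
--     #            right[i] = length of the run of 1s starting at i.
--     left: List[int] = []
--     c = 0
--     for v in lst:
--         c = c + 1 if v == 1 else 0
--         left.append(c)
--     right: List[int] = []
--     c = 0
--     for v in reversed(lst):
--         c = c + 1 if v == 1 else 0
--         right.append(c)
--     right.reverse()
--     # sentinel pair: -1 plus the leading run
--     best = max(0, -1 + (right[0] if lst[0] == 1 else 0))
--     # each non-1 position joins the run ending before it with the run after it
--     for v, l, r in zip(lst, [0] + left[:-1], right[1:] + [0]):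
--         if v != 1:
--             best = max(best, l + r)
--     return best
-- ===== Notes on version B (the rewrite author's own statement) =====
-- stated objective: alternative
-- what changed: B computes two per-position DP arrays (left[i] = run of 1s ending at i, right[i] = run starting at i, the second by a reversed scan) and takes the best left[i-1]+right[i+1] over the non-1 positions together with the -1+leading-run sentinel pair, instead of A's single streaming pass with prev/curr rolling accumulators.
import Mathlib
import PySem

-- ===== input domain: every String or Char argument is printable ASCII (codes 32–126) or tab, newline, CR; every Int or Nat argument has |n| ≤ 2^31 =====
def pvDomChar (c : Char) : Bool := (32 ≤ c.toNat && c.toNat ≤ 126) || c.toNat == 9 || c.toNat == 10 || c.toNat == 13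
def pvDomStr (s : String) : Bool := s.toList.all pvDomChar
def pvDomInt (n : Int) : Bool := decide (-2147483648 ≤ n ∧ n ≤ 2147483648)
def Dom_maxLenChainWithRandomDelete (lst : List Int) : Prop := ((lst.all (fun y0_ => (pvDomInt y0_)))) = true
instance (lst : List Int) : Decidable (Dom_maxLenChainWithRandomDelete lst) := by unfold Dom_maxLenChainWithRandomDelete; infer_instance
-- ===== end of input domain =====

-- B replaces A's streaming prev/curr accumulators by two per-position DP arrays
-- (run of 1s ending at i / starting at i) and a best-candidate pass over the
-- non-1 positions (objective: alternative algorithm, same O(n) cost).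

-- ===== PORT A =====
-- loop state (prevChainLen, currChainLen, res)
def pvStepA (st : Int × Int × Int) (v : Int) : Int × Int × Int :=
  match st with
  | (prev, curr, res) =>
    if v = 1 then (prev, curr + 1, res)
    else (curr, 0, max res (prev + curr))

def maxLenChainWithRandomDelete (lst : List Int) : Int :=
  if lst = [] then 0
  else
    match lst.foldl pvStepA (-1, 0, 0) with
    | (prev, curr, res) => max res (prev + curr)

-- ===== PORT B =====
-- the append-loop building a DP array of run lengths (Source B's two `for` loops)
def pvScanRuns (lst : List Int) : List Int :=
  (lst.foldl (fun (acc : List Int × Int) v =>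
      let c := if v = 1 then acc.2 + 1 else 0
      (acc.1 ++ [c], c)) ([], 0)).1

def maxLenChainWithRandomDelete_alt (lst : List Int) : Int :=
  if lst = [] then 0
  else
    let left := pvScanRuns lst
    let right := (pvScanRuns lst.reverse).reverse
    let best0 := max 0 (-1 + (if lst.headD 0 = 1 then right.headD 0 else 0))
    (lst.zip ((0 :: left.dropLast).zip (right.tail ++ [0]))).foldl
      (fun best p => if p.1 ≠ 1 then max best (p.2.1 + p.2.2) else best) best0

-- ===== PRECONDITION & SPEC =====
def Spec_maxLenChainWithRandomDelete (lst : List Int) (out : Int) : Prop := out = maxLenChainWithRandomDelete_alt lst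
instance (lst : List Int) (out : Int) : Decidable (Spec_maxLenChainWithRandomDelete lst out) := by unfold Spec_maxLenChainWithRandomDelete; infer_instance

-- ===== CLAIM (what is proved, stated in full; the proofs are below) =====
def Claim_equal_maxLenChainWithRandomDelete : Prop := ∀ (lst : List Int), Dom_maxLenChainWithRandomDelete lst → Spec_maxLenChainWithRandomDelete lst (maxLenChainWithRandomDelete lst)

-- ===== LEMMAS AND PROOFS =====

-- length of the leading run of 1s
def pvH : List Int → Int
  | [] => 0
  | v :: tl => if v = 1 then pvH tl + 1 else 0

-- structural form of the left DP array (c = run length carried in)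
def pvLeftRec (c : Int) : List Int → List Int
  | [] => []
  | v :: tl => (if v = 1 then c + 1 else 0) :: pvLeftRec (if v = 1 then c + 1 else 0) tl

-- structural form of the right DP array
def pvRightRec : List Int → List Int
  | [] => []
  | v :: tl => pvH (v :: tl) :: pvRightRec tl

-- the contributions A's loop accumulates (final prev+curr included)
def pvAsums (p c : Int) : List Int → List Int
  | [] => [p + c]
  | v :: tl => if v = 1 then pvAsums p (c + 1) tl else (p + c) :: pvAsums c 0 tl

-- the contributions B's candidate pass accumulates
def pvSums (c : Int) : List Int → List Int
  | [] => []
  | v :: tl => if v = 1 then pvSums (c + 1) tl else (c + pvH tl) :: pvSums 0 tl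

lemma pvScan_spec (lst : List Int) : ∀ (xs : List Int) (c : Int),
    (lst.foldl (fun (acc : List Int × Int) v =>
        let c := if v = 1 then acc.2 + 1 else 0
        (acc.1 ++ [c], c)) (xs, c)).1 = xs ++ pvLeftRec c lst := by
  induction lst with
  | nil => intro xs c; simp [pvLeftRec]
  | cons v tl ih =>
      intro xs c
      simp only [List.foldl_cons, pvLeftRec]
      rw [ih]
      simp

lemma pvScanRuns_eq (lst : List Int) : pvScanRuns lst = pvLeftRec 0 lst := by
  simpa using pvScan_spec lst [] 0

lemma pvLeftRec_append (xs : List Int) (v : Int) : ∀ (c : Int),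
    pvLeftRec c (xs ++ [v])
      = pvLeftRec c xs ++ [if v = 1 then (pvLeftRec c xs).getLastD c + 1 else 0] := by
  induction xs with
  | nil => intro c; simp [pvLeftRec]
  | cons w tl ih =>
      intro c
      simp only [List.cons_append, pvLeftRec, ih, List.getLastD_cons]

lemma pvRightRec_headD (lst : List Int) : (pvRightRec lst).headD 0 = pvH lst := by
  cases lst <;> simp [pvRightRec, pvH]

lemma pvRight_eq (lst : List Int) :
    (pvLeftRec 0 lst.reverse).reverse = pvRightRec lst := by
  induction lst with
  | nil => simp [pvLeftRec, pvRightRec]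
  | cons v tl ih =>
      have h1 : (v :: tl).reverse = tl.reverse ++ [v] := by simp
      rw [h1, pvLeftRec_append]
      simp only [List.reverse_append, List.reverse_cons, List.reverse_nil, List.nil_append,
        List.cons_append, ih]
      have hlast : (pvLeftRec 0 tl.reverse).getLastD 0 = (pvRightRec tl).headD 0 := by
        rw [List.getLastD_eq_getLast?, ← List.head?_reverse, ih]
        cases h : (pvRightRec tl).head? <;> simp [h]
      rw [hlast, pvRightRec_headD]
      simp [pvRightRec, pvH]

-- A's loop equals a max-fold over its contribution list
lemma pvA_spec (lst : List Int) : ∀ (p c b : Int),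
    max (lst.foldl pvStepA (p, c, b)).2.2
        ((lst.foldl pvStepA (p, c, b)).1 + (lst.foldl pvStepA (p, c, b)).2.1)
      = (pvAsums p c lst).foldl max b := by
  induction lst with
  | nil => intro p c b; simp [pvAsums]
  | cons v tl ih =>
      intro p c b
      simp only [List.foldl_cons, pvStepA, pvAsums]
      by_cases hv : v = 1
      · simp only [hv, reduceIte]; exact ih p (c + 1) b
      · simp only [if_neg hv, List.foldl_cons]; exact ih c 0 (max b (p + c))

-- B's zip pass equals a max-fold over its contribution list
lemma pvB_spec (lst : List Int) : ∀ (c b : Int),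
    (lst.zip ((c :: (pvLeftRec c lst).dropLast).zip ((pvRightRec lst).tail ++ [0]))).foldl
        (fun best p => if p.1 ≠ 1 then max best (p.2.1 + p.2.2) else best) b
      = (pvSums c lst).foldl max b := by
  induction lst with
  | nil => intro c b; simp [pvSums]
  | cons v tl ih =>
      intro c b
      have hcons : pvLeftRec c (v :: tl)
          = (if v = 1 then c + 1 else 0) :: pvLeftRec (if v = 1 then c + 1 else 0) tl := rfl
      cases tl with
      | nil =>
          by_cases hv : v = 1 <;>
            simp [pvRightRec, pvLeftRec, pvSums, hv, pvH]
      | cons w tl2 =>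
          set c' : Int := if v = 1 then c + 1 else 0 with hc'
          have hdl : (pvLeftRec c (v :: w :: tl2)).dropLast
              = c' :: (pvLeftRec c' (w :: tl2)).dropLast := by
            rw [hcons]
            cases hL : pvLeftRec c' (w :: tl2) with
            | nil => simp [pvLeftRec] at hL
            | cons x xs => simp
          have hrt : (pvRightRec (v :: w :: tl2)).tail ++ [0]
              = pvH (w :: tl2) :: ((pvRightRec (w :: tl2)).tail ++ [0]) := by
            simp [pvRightRec]
          rw [hdl, hrt]
          simp only [List.zip_cons_cons, List.foldl_cons]
          by_cases hv : v = 1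
          · have h0 : c' = c + 1 := by simp [hc', hv]
            simp only [hv, ne_eq, not_true_eq_false, reduceIte, pvSums, h0]
            exact ih (c + 1) b
          · have h0 : c' = 0 := by simp [hc', hv]
            simp only [ne_eq, hv, not_false_eq_true, reduceIte, pvSums, List.foldl_cons, h0]
            exact ih 0 (max b (c + pvH (w :: tl2)))

-- A's contribution list is "sentinel pair, then B's contribution list"
lemma pvKey (lst : List Int) : ∀ (p c : Int),
    pvAsums p c lst = (p + c + pvH lst) :: pvSums c lst := by
  induction lst with
  | nil => intro p c; simp [pvAsums, pvSums, pvH]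
  | cons v tl ih =>
      intro p c
      by_cases hv : v = 1
      · simp only [pvAsums, pvSums, pvH, hv, reduceIte, ih]
        congr 1
        ring
      · simp only [pvAsums, pvSums, pvH, if_neg hv, ih]
        norm_num

-- ===== VERDICT (by name: the statement is the Claim_ definition above) =====
theorem maxLenChainWithRandomDelete_spec : Claim_equal_maxLenChainWithRandomDelete := by
  intro lst _
  unfold Spec_maxLenChainWithRandomDelete maxLenChainWithRandomDelete maxLenChainWithRandomDelete_alt
  by_cases h : lst = []
  · simp [h]
  · simp only [if_neg h]
    have hright : (pvScanRuns lst.reverse).reverse = pvRightRec lst := by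
      rw [pvScanRuns_eq, pvRight_eq]
    have hb0 : (if lst.headD 0 = 1 then (pvRightRec lst).headD 0 else 0)
        = pvH lst := by
      cases lst with
      | nil => exact absurd rfl h
      | cons v tl =>
          by_cases hv : v = 1 <;> simp [pvRightRec, pvH, hv]
    rw [pvA_spec lst (-1) 0 0, pvKey]
    rw [hright, hb0, pvScanRuns_eq]
    have := pvB_spec lst 0 (max 0 (-1 + 0 + pvH lst))
    simp only [List.foldl_cons]
    rw [← this]
    norm_num
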